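-- pv_equiv track=rewrite | github.com/pypi-data/pypi-mirror-385 | packages/qkdpy/qkdpy-0.2.9-py3-none-any.whl/qkdpy/crypto/enhanced_security.py | reconstruct_key
-- ===== SOURCE A (Python) =====
-- def reconstruct_key(parts: list[list[int]]) -> list[int]:
--     """Reconstruct a key from its parts.
--
--     Args:
--         parts: List of key parts
--
--     Returns:
--         Reconstructed key
--     """
--     if not parts:
--         raise ValueError("No parts provided")
--
--     # XOR all parts to get the original key
--     key = [0] * len(parts[0])
--     for part in parts:
--         for j in range(len(key)):
--             key[j] ^= part[j]
--
--     return key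
-- ===== SOURCE B (Python) =====
-- def reconstruct_key(parts: list[list[int]]) -> list[int]:
--     """Reconstruct a key from its parts.
--
--     Balanced pairwise reduction: truncate every part to the key length once,
--     then repeatedly XOR-combine adjacent pairs until one vector remains.
--     """
--     if not parts:
--         raise ValueError("No parts provided")
--
--     n = len(parts[0])
--     level = [part[:n] for part in parts]
--     while len(level) > 1:
--         nxt = [[x ^ y for x, y in zip(level[i], level[i + 1])]
--                for i in range(0, len(level) - 1, 2)]
--         if len(level) % 2:
--             nxt.append(level[-1])
--         level = nxt
--     return level[0]
-- ===== Notes on version B (the rewrite author's own statement) =====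
-- stated objective: alternative
-- what changed: B truncates every part to the key length once and then reduces the list of parts by a balanced pairwise (tree-shaped) XOR combination of adjacent vectors until one remains, instead of A's linear accumulation of every part into a zero-initialised key array; correctness rests on XOR being associative and commutative with identity 0.
import Mathlib
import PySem

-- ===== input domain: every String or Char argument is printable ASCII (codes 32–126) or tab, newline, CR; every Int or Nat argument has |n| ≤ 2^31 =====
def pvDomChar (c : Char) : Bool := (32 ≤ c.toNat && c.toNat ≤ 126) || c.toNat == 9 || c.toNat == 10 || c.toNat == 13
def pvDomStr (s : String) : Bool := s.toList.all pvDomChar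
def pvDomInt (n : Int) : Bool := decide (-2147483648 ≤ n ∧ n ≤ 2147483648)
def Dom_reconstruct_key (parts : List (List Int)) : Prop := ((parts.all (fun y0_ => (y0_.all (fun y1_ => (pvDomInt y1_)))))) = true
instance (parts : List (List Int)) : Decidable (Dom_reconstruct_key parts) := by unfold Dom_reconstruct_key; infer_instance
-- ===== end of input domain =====

-- B reconstructs the key by a balanced pairwise (tree-shaped) XOR reduction of the
-- truncated parts instead of A's linear accumulation into a zero array; same cost.

-- ===== PORT A =====
def reconstruct_key (parts : List (List Int)) : List Int :=
  match parts with
  | [] => []  -- Python raises ValueError here; excluded by Pre_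
  | p0 :: _ =>
    let key0 := List.replicate p0.length (0 : Int)
    parts.foldl (fun key part =>
      (PySem.List.pyRange 0 (key.length : Int) 1).foldl (fun k j =>
        PySem.List.pySetD k j
          (PySem.Int.bxor (PySem.List.pyGetD k j 0) (PySem.List.pyGetD part j 0))) key) key0

-- ===== PORT B =====
-- [x ^ y for x, y in zip(a, b)]
def pvXor2 (a b : List Int) : List Int :=
  (a.zip b).map (fun p => PySem.Int.bxor p.1 p.2)

-- one pass of the while-loop body: combine adjacent pairs, keep an odd leftover last
def pvPairwise : List (List Int) → List (List Int)
  | a :: b :: rest => pvXor2 a b :: pvPairwise rest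
  | l => l

theorem pvPairwise_length_le : ∀ l : List (List Int), (pvPairwise l).length ≤ l.length
  | [] => by simp [pvPairwise]
  | [a] => by simp [pvPairwise]
  | a :: b :: rest => by
    have := pvPairwise_length_le rest
    simp only [pvPairwise, List.length_cons]
    omega

theorem pvPairwise_length_lt (l : List (List Int)) (h : 2 ≤ l.length) :
    (pvPairwise l).length < l.length := by
  match l, h with
  | a :: b :: rest, _ =>
    have := pvPairwise_length_le rest
    simp only [pvPairwise, List.length_cons]
    omega

-- the while-loop: reduce levels until a single vector remains
def pvReduce (level : List (List Int)) : List Int :=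
  if h : 2 ≤ level.length then pvReduce (pvPairwise level) else level.headD []
termination_by level.length
decreasing_by exact pvPairwise_length_lt level h

def reconstruct_key_alt (parts : List (List Int)) : List Int :=
  match parts with
  | [] => []  -- Python raises ValueError here; excluded by Pre_
  | p0 :: _ =>
    pvReduce (parts.map (fun p => PySem.List.slice p none (some (p0.length : Int))))

-- ===== PRECONDITION & SPEC =====
-- Pre_ excludes exactly the inputs where Python A raises: empty parts (ValueError)
-- and a part shorter than parts[0] (IndexError).
def Pre_reconstruct_key (parts : List (List Int)) : Prop :=
  parts ≠ [] ∧ ∀ p ∈ parts, (parts.headD []).length ≤ p.length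
instance (parts : List (List Int)) : Decidable (Pre_reconstruct_key parts) := by
  unfold Pre_reconstruct_key; infer_instance
def pvWitness_reconstruct_key : List (List Int) := [[1, 2, 3], [4, 5, 6]]

def Spec_reconstruct_key (parts : List (List Int)) (out : List Int) : Prop := out = reconstruct_key_alt parts
instance (parts : List (List Int)) (out : List Int) : Decidable (Spec_reconstruct_key parts out) := by unfold Spec_reconstruct_key; infer_instance

-- ===== CLAIM (what is proved, stated in full; the proofs are below) =====
def Claim_equal_reconstruct_key : Prop := ∀ (parts : List (List Int)), Dom_reconstruct_key parts → Pre_reconstruct_key parts → Spec_reconstruct_key parts (reconstruct_key parts)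

-- ===== LEMMAS AND PROOFS =====

-- ---- XOR algebra (no Int.xor associativity/identity lemmas exist in Mathlib) ----
theorem pv_bxor_eq_xor (a b : Int) : PySem.Int.bxor a b = Int.xor a b := by
  unfold PySem.Int.bxor
  cases a <;> cases b <;> simp [Int.xor] <;> omega

theorem pv_bxor_assoc (a b c : Int) :
    PySem.Int.bxor (PySem.Int.bxor a b) c = PySem.Int.bxor a (PySem.Int.bxor b c) := by
  simp only [pv_bxor_eq_xor]
  cases a <;> cases b <;> cases c <;> simp [Int.xor, Nat.xor_assoc]

theorem pv_zero_bxor (a : Int) : PySem.Int.bxor 0 a = a := by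
  rw [PySem.Int.bxor_comm, PySem.Int.bxor_zero]

theorem pv_foldl_bxor_shift :
    ∀ (l : List Int) (s : Int),
      l.foldl PySem.Int.bxor s = PySem.Int.bxor s (l.foldl PySem.Int.bxor 0) := by
  intro l
  induction l with
  | nil => intro s; simp [PySem.Int.bxor_zero]
  | cons x t ih =>
    intro s
    simp only [List.foldl_cons]
    rw [ih (PySem.Int.bxor s x), ih (PySem.Int.bxor 0 x), pv_zero_bxor, pv_bxor_assoc]

-- ---- A-side: the double loop is a columnwise XOR fold ----
theorem pv_foldl_set_range' (f : Nat → Int → Int) :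
    ∀ (l pre : List Int),
      (List.range' pre.length l.length).foldl
          (fun k j => k.set j (f j (k.getD j 0))) (pre ++ l)
        = pre ++ l.mapIdx fun j x => f (pre.length + j) x := by
  intro l
  induction l with
  | nil => intro pre; simp
  | cons x t ih =>
    intro pre
    have hget : (pre ++ x :: t).getD pre.length 0 = x := by
      simp [List.getD]
    have hset : (pre ++ x :: t).set pre.length (f pre.length x) =
        (pre ++ [f pre.length x]) ++ t := by
      rw [List.set_append_right _ _ (le_refl _)]
      simp
    rw [List.length_cons, List.range'_succ, List.foldl_cons, hget, hset]
    have := ih (pre ++ [f pre.length x])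
    simp only [List.length_append, List.length_cons, List.length_nil] at this
    rw [show pre.length + 1 = pre.length + 0 + 1 by omega] at this ⊢
    rw [this]
    simp only [List.mapIdx_cons, List.append_assoc, List.cons_append, List.nil_append,
      Nat.add_zero]
    congr 3
    funext i y
    congr 1
    omega

theorem pv_inner (part key : List Int) :
    (PySem.List.pyRange 0 (key.length : Int) 1).foldl (fun k j =>
        PySem.List.pySetD k j
          (PySem.Int.bxor (PySem.List.pyGetD k j 0) (PySem.List.pyGetD part j 0))) key
      = key.mapIdx fun j x => PySem.Int.bxor x (part.getD j 0) := by
  rw [PySem.List.pyRange_one]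
  simp only [Int.sub_zero, Int.toNat_natCast, List.foldl_map, zero_add,
    PySem.List.pySetD_natCast, PySem.List.pyGetD_natCast, Int.toNat_natCast]
  rw [List.range_eq_range']
  have := pv_foldl_set_range' (fun j v => PySem.Int.bxor v (part.getD j 0)) key []
  simpa using this

theorem pv_outer :
    ∀ (L : List (List Int)) (key : List Int),
      L.foldl (fun key part =>
          (PySem.List.pyRange 0 (key.length : Int) 1).foldl (fun k j =>
            PySem.List.pySetD k j
              (PySem.Int.bxor (PySem.List.pyGetD k j 0) (PySem.List.pyGetD part j 0))) key) key
        = key.mapIdx fun j x =>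
            L.foldl (fun a p => PySem.Int.bxor a (p.getD j 0)) x := by
  intro L
  induction L with
  | nil =>
    intro key
    simp [List.mapIdx_eq_zipIdx_map]
  | cons p L ih =>
    intro key
    rw [List.foldl_cons, pv_inner, ih, List.mapIdx_mapIdx]
    simp [List.foldl_cons, Function.comp_def]

theorem pv_mapIdx_replicate :
    ∀ (n : Nat) (f : Nat → Int → Int), (List.replicate n (0 : Int)).mapIdx f
      = (List.range n).map fun j => f j 0 := by
  intro n
  induction n with
  | zero => intro f; simp
  | succ m ih =>
    intro f
    rw [List.replicate_succ, List.mapIdx_cons, List.range_succ_eq_map]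
    simp [ih (fun i => f (i + 1)), List.map_map, Function.comp_def]

theorem pv_A_columnwise (p0 : List Int) (rest : List (List Int)) :
    reconstruct_key (p0 :: rest)
      = (List.range p0.length).map fun j =>
          (((p0 :: rest).map (fun v => v.getD j 0)).foldl PySem.Int.bxor 0) := by
  unfold reconstruct_key
  simp only
  rw [pv_outer, pv_mapIdx_replicate]
  apply List.map_congr_left
  intro j _
  rw [List.foldl_map]

-- ---- B-side: each level keeps every column's XOR invariant ----
theorem pv_xor2_getD (a b : List Int) (n j : Nat) (ha : a.length = n) (hb : b.length = n)
    (hj : j < n) :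
    (pvXor2 a b).getD j 0 = PySem.Int.bxor (a.getD j 0) (b.getD j 0) := by
  have hja : j < a.length := by omega
  have hjb : j < b.length := by omega
  have hz : j < (a.zip b).length := by simp [List.length_zip]; omega
  unfold pvXor2
  simp [List.getD, hja, hjb]

theorem pv_pairwise_len (n : Nat) :
    ∀ L : List (List Int), (∀ v ∈ L, v.length = n) → ∀ v ∈ pvPairwise L, v.length = n
  | [] => by intro h v hv; exact h v hv
  | [a] => by intro h v hv; exact h v hv
  | a :: b :: rest => by
    intro h v hv
    simp only [pvPairwise, List.mem_cons] at hv
    rcases hv with hv | hv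
    · subst hv
      have ha := h a (by simp)
      have hb := h b (by simp)
      simp [pvXor2, List.length_zip, ha, hb]
    · exact pv_pairwise_len n rest (fun w hw => h w (by simp [hw])) v hv

theorem pv_pairwise_ne_nil (L : List (List Int)) (h : L ≠ []) : pvPairwise L ≠ [] := by
  match L, h with
  | [a], _ => simp [pvPairwise]
  | a :: b :: rest, _ => simp [pvPairwise]

theorem pv_pairwise_col (n j : Nat) (hj : j < n) :
    ∀ L : List (List Int), (∀ v ∈ L, v.length = n) →
      ((pvPairwise L).map (fun v => v.getD j 0)).foldl PySem.Int.bxor 0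
        = (L.map (fun v => v.getD j 0)).foldl PySem.Int.bxor 0 := by
  intro L
  match L with
  | [] => intro _; rfl
  | [a] => intro _; rfl
  | a :: b :: rest =>
    intro h
    have ha := h a (by simp)
    have hb := h b (by simp)
    have hrest : ∀ v ∈ rest, v.length = n := fun w hw => h w (by simp [hw])
    simp only [pvPairwise, List.map_cons, List.foldl_cons]
    rw [pv_foldl_bxor_shift _ (PySem.Int.bxor 0 _), pv_pairwise_col n j hj rest hrest,
        pv_foldl_bxor_shift _ (PySem.Int.bxor (PySem.Int.bxor 0 _) _),
        pv_xor2_getD a b n j ha hb hj, pv_zero_bxor, pv_zero_bxor, pv_bxor_assoc]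

theorem pv_getD_range_self (v : List Int) :
    (List.range v.length).map (fun j => v.getD j 0) = v := by
  apply List.ext_getElem
  · simp
  · intro i h1 h2
    simp [List.getD, List.getElem?_eq_getElem h2]

theorem pv_reduce_spec (n : Nat) :
    ∀ L : List (List Int), L ≠ [] → (∀ v ∈ L, v.length = n) →
      pvReduce L = (List.range n).map fun j =>
        ((L.map (fun v => v.getD j 0)).foldl PySem.Int.bxor 0) := by
  intro L
  induction L using pvReduce.induct with
  | case1 L h ih =>
    intro _ hlen
    rw [pvReduce, dif_pos h, ih (pv_pairwise_ne_nil L (by intro e; subst e; simp at h))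
          (pv_pairwise_len n L hlen)]
    apply List.map_congr_left
    intro j hj
    exact pv_pairwise_col n j (List.mem_range.mp hj) L hlen
  | case2 L h =>
    intro hne hlen
    rw [pvReduce, dif_neg h]
    match L, hne with
    | [v], _ =>
      have hv : v.length = n := hlen v (by simp)
      simp only [List.headD, List.map_cons, List.map_nil, List.foldl_cons, List.foldl_nil,
        pv_zero_bxor]
      rw [← hv, pv_getD_range_self]
    | a :: b :: rest, _ => simp at h

theorem pv_getD_take (v : List Int) (n j : Nat) (hj : j < n) :
    (v.take n).getD j 0 = v.getD j 0 := by
  simp [List.getD, hj]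

-- ===== VERDICT (by name: the statement is the Claim_ definition above) =====
theorem reconstruct_key_spec : Claim_equal_reconstruct_key := by
  intro parts _ hpre
  unfold Spec_reconstruct_key
  obtain ⟨hne, hlen⟩ := hpre
  match parts, hne with
  | p0 :: rest, _ =>
    unfold reconstruct_key_alt
    simp only
    have hlen' : ∀ v ∈ (p0 :: rest).map (fun p => p.take p0.length), v.length = p0.length := by
      intro v hv
      obtain ⟨p, hp, rfl⟩ := List.mem_map.mp hv
      have := hlen p hp
      simp only [List.headD] at this
      simp [List.length_take]
      omega
    rw [show ((p0 :: rest).map (fun p => PySem.List.slice p none (some (p0.length : Int))))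
          = (p0 :: rest).map (fun p => p.take p0.length) by
        apply List.map_congr_left; intro p _
        rw [PySem.List.slice_to _ (Int.natCast_nonneg _), Int.toNat_natCast]]
    rw [pv_reduce_spec p0.length _ (by simp) hlen', pv_A_columnwise]
    apply List.map_congr_left
    intro j hj
    have hjn := List.mem_range.mp hj
    congr 1
    rw [List.map_map]
    apply List.map_congr_left
    intro p _
    exact (pv_getD_take p p0.length j hjn).symm
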